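-- pv_equiv track=rewrite | github.com/liuluyang/mk | 作业练习题/早自习练习题/练习题05.py | range_new_04
-- ===== SOURCE A (Python) =====
-- def range_new_04(start, end, step):
--
--     if not isinstance(start, int) or not isinstance(end, int) or not isinstance(step, int):
--         raise TypeError('参数必须是整数')
--     if step == 0:
--         raise ValueError('步长不能为0')
--     start = start
--
--     while start > end:
--         yield start
--         start += step
-- ===== SOURCE B (Python) =====
-- def range_new_04(start, end, step):
--     # Closed-form re-implementation: compute the number of terms, then
--     # yield the arithmetic sequence directly instead of running a counter loop.
--     for v in (start, end, step):
--         if not isinstance(v, int):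
--             raise TypeError('参数必须是整数')
--     if step == 0:
--         raise ValueError('步长不能为0')
--     if step < 0 and start > end:
--         n = (start - end - step - 1) // (-step)   # ceil((start-end)/(-step))
--         yield from (start + i * step for i in range(n))
-- ===== Notes on version B (the rewrite author's own statement) =====
-- stated objective: alternative
-- what changed: Replaces the mutable-counter while-loop with a closed-form term count n = ceil((start-end)/(-step)) and a direct generator over range(n); the iterative loop disappears.
import Mathlib
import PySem

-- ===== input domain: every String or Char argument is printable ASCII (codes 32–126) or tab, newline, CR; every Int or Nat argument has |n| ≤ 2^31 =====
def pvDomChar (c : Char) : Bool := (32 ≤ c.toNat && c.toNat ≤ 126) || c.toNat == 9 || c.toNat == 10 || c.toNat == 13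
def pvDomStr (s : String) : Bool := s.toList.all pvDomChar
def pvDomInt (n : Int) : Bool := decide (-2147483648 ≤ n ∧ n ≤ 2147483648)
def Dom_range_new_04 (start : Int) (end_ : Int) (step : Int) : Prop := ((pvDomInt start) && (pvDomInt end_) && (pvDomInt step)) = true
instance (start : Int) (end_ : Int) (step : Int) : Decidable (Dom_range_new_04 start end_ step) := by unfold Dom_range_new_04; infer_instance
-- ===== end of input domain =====

-- B computes the sequence length in closed form and maps it out; A's while-loop with a mutable counter is gone (objective: alternative).
-- A and B are Python generators; equivalence is about the list of yielded values.

-- ===== PORT A =====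
-- the while loop of A; fuel only makes the recursion total (with step < 0 and
-- start > end_, (start - end_).toNat iterations always suffice)
def rangeNew04Loop (start : Int) (end_ : Int) (step : Int) : Nat → List Int
  | 0 => []
  | fuel + 1 => if start > end_ then start :: rangeNew04Loop (start + step) end_ step fuel else []

def range_new_04 (start : Int) (end_ : Int) (step : Int) : List Int :=
  if step = 0 then []   -- A raises ValueError here (excluded by Pre_)
  else rangeNew04Loop start end_ step (start - end_).toNat

-- ===== PORT B =====
def range_new_04_alt (start : Int) (end_ : Int) (step : Int) : List Int :=
  if step = 0 then []   -- B raises ValueError here (excluded by Pre_)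
  else if step < 0 ∧ start > end_ then
    let n := PySem.Int.floordiv (start - end_ - step - 1) (-step)
    (List.range n.toNat).map (fun (i : Nat) => start + (i : Int) * step)
  else []

-- ===== PRECONDITION & SPEC =====
-- Pre_ excludes step = 0, where A raises ValueError, and step > 0 with start > end,
-- where A's generator never terminates; on both A yields no finished value.
def Pre_range_new_04 (start : Int) (end_ : Int) (step : Int) : Prop :=
  step ≠ 0 ∧ (0 < step → start ≤ end_)
instance (start : Int) (end_ : Int) (step : Int) : Decidable (Pre_range_new_04 start end_ step) := by
  unfold Pre_range_new_04; infer_instance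

def pvWitness_range_new_04 : Int × Int × Int := (10, 1, -3)

def Spec_range_new_04 (start : Int) (end_ : Int) (step : Int) (out : List Int) : Prop := out = range_new_04_alt start end_ step
instance (start : Int) (end_ : Int) (step : Int) (out : List Int) : Decidable (Spec_range_new_04 start end_ step out) := by unfold Spec_range_new_04; infer_instance

-- ===== CLAIM (what is proved, stated in full; the proofs are below) =====
def Claim_equal_range_new_04 : Prop := ∀ (start : Int) (end_ : Int) (step : Int), Dom_range_new_04 start end_ step → Pre_range_new_04 start end_ step → Spec_range_new_04 start end_ step (range_new_04 start end_ step)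

-- ===== LEMMAS AND PROOFS =====

lemma rangeNew04Loop_eq (end_ step : Int) (hs : step < 0) :
    ∀ (fuel : Nat) (start : Int), (start - end_).toNat ≤ fuel →
      rangeNew04Loop start end_ step fuel
        = (List.range ((start - end_ - step - 1) / (-step)).toNat).map
            (fun (i : Nat) => start + (i : Int) * step) := by
  intro fuel
  induction fuel with
  | zero =>
    intro start hf
    have hle : start ≤ end_ := by omega
    have hnum : start - end_ - step - 1 < 1 * (-step) := by omega
    have hlt : (start - end_ - step - 1) / (-step) < 1 :=
      (Int.ediv_lt_iff_lt_mul (by omega)).mpr hnum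
    have h0 : ((start - end_ - step - 1) / (-step)).toNat = 0 := by omega
    simp only [rangeNew04Loop, h0, List.range_zero, List.map_nil]
  | succ f ih =>
    intro start hf
    by_cases hgt : start > end_
    · have hf' : (start + step - end_).toNat ≤ f := by omega
      have hIH := ih (start + step) hf'
      have hnum : start + step - end_ - step - 1 = start - end_ - 1 := by ring
      have hsplit : start - end_ - step - 1 = (start - end_ - 1) + 1 * (-step) := by ring
      have hdiv : (start - end_ - step - 1) / (-step) = (start - end_ - 1) / (-step) + 1 := by
        rw [hsplit, Int.add_mul_ediv_right _ _ (by omega : (-step) ≠ 0)]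
      have hnn : 0 ≤ (start - end_ - 1) / (-step) :=
        Int.ediv_nonneg (by omega) (by omega)
      have htn : ((start - end_ - step - 1) / (-step)).toNat
          = ((start - end_ - 1) / (-step)).toNat + 1 := by omega
      rw [show rangeNew04Loop start end_ step (f + 1)
            = start :: rangeNew04Loop (start + step) end_ step f by
            simp [rangeNew04Loop, hgt]]
      rw [hIH, hnum, htn, List.range_succ_eq_map, List.map_cons, List.map_map]
      refine congrArg₂ List.cons (by norm_num) ?_
      apply List.map_congr_left
      intro i _
      simp only [Function.comp_apply]
      push_cast; ring
    · have hle : start ≤ end_ := by omega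
      have : (start - end_).toNat = 0 := by omega
      have hnum : start - end_ - step - 1 < 1 * (-step) := by omega
      have hlt : (start - end_ - step - 1) / (-step) < 1 :=
        (Int.ediv_lt_iff_lt_mul (by omega)).mpr hnum
      have h0 : ((start - end_ - step - 1) / (-step)).toNat = 0 := by omega
      simp only [rangeNew04Loop, if_neg hgt, h0, List.range_zero, List.map_nil]

-- ===== VERDICT (by name: the statement is the Claim_ definition above) =====
theorem range_new_04_spec : Claim_equal_range_new_04 := by
  intro start end_ step _ hpre
  obtain ⟨hnz, hpos⟩ := hpre
  unfold Spec_range_new_04 range_new_04 range_new_04_alt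
  rcases lt_trichotomy step 0 with hlt | heq | hgt
  · rw [if_neg hnz, if_neg hnz]
    by_cases hse : start > end_
    · rw [if_pos ⟨hlt, hse⟩]
      have := rangeNew04Loop_eq end_ step hlt (start - end_).toNat start le_rfl
      rw [this, PySem.Int.floordiv_eq_ediv_of_pos (by omega)]
    · rw [if_neg (by tauto)]
      have h0 : (start - end_).toNat = 0 := by omega
      rw [h0]; rfl
  · exact absurd heq hnz
  · rw [if_neg hnz, if_neg hnz, if_neg (by omega)]
    have h0 : (start - end_).toNat = 0 := by
      have := hpos hgt; omega
    rw [h0]; rfl
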